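-- pv_equiv track=rewrite | github.com/PiErr0r/comp_prog | codejam/2020/nesting_depth.py | add_p
-- ===== SOURCE A (Python) =====
-- def add_p(L):
--     ret = []
--     for n in L:
--         ret += ['('] * n + [str(n)] + [')'] * n
--     i = 0
--     ln = len(ret)
--
--     while i < ln - 1:
--         if ''.join(ret[i : i + 2]) == ')(':
--             ret.pop(i)
--             ret.pop(i)
--             ln -= 2
--             i -= 1
--         else:
--             i += 1
--
--     return ''.join(ret)
-- ===== SOURCE B (Python) =====
-- def add_p(L):
--     parts = []
--     prev = 0
--     for n in L:
--         m = n if n > 0 else 0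
--         if m >= prev:
--             parts.append('(' * (m - prev))
--         else:
--             parts.append(')' * (prev - m))
--         parts.append(str(n))
--         prev = m
--     parts.append(')' * prev)
--     return ''.join(parts)
-- ===== Notes on version B (the rewrite author's own statement) =====
-- stated objective: faster
-- what changed: Instead of materialising every paren as a list element and repeatedly cancelling adjacent ')(' pairs with quadratic pop/backtrack passes, B does one pass tracking the current nesting depth and emits only the surviving parens between consecutive numbers.
import Mathlib
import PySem

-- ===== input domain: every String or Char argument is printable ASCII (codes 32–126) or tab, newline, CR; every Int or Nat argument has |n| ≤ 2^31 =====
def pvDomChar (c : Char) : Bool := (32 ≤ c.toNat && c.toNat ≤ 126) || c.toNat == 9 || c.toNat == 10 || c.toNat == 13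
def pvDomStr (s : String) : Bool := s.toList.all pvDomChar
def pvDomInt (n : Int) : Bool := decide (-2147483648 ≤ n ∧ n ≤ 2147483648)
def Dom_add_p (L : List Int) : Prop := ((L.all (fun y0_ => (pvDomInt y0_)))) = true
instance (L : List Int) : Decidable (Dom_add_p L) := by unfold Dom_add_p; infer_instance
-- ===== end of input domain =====

-- B replaces A's quadratic build-then-cancel of adjacent ')(' pairs by a single pass
-- tracking the current nesting depth; the return values are proved equal.

-- ===== PORT A =====
-- ret built by 'for n in L: ret += ['(']*n + [str(n)] + [')']*n'
def pvBuild (L : List Int) : List String :=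
  L.foldl (fun ret n =>
    ret ++ (List.replicate n.toNat "(" ++ [PySem.Int.toStr n] ++ List.replicate n.toNat ")")) []

-- the 'while i < ln - 1' cancellation loop; the pop? none-branches are unreachable (Python never raises here)
def pvLoopA (ret : List String) (i ln : Int) : List String :=
  if h : i < ln - 1 then
    if String.join (PySem.List.slice ret (some i) (some (i + 2))) = ")(" then
      match PySem.List.pop? ret i with
      | some (_, r1) =>
        match PySem.List.pop? r1 i with
        | some (_, r2) => pvLoopA r2 (i - 1) (ln - 2)
        | none => r1
      | none => ret
    else pvLoopA ret (i + 1) ln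
  else ret
termination_by (ln - 1 - i).toNat
decreasing_by all_goals omega

def add_p (L : List Int) : String :=
  let ret := pvBuild L
  String.join (pvLoopA ret 0 (PySem.List.len ret))

-- ===== PORT B =====
def pvStepB (st : Int × List String) (n : Int) : Int × List String :=
  let prev := st.1
  let m : Int := if 0 < n then n else 0
  let parts := st.2
    ++ [if prev ≤ m then String.ofList (List.replicate (m - prev).toNat '(')
        else String.ofList (List.replicate (prev - m).toNat ')')]
    ++ [PySem.Int.toStr n]
  (m, parts)

def add_p_alt (L : List Int) : String :=
  let st := L.foldl pvStepB (0, [])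
  String.join (st.2 ++ [String.ofList (List.replicate st.1.toNat ')')])

-- ===== PRECONDITION & SPEC =====
def Spec_add_p (L : List Int) (out : String) : Prop := out = add_p_alt L
instance (L : List Int) (out : String) : Decidable (Spec_add_p L out) := by unfold Spec_add_p; infer_instance

-- ===== CLAIM (what is proved, stated in full; the proofs are below) =====
def Claim_equal_add_p : Prop := ∀ (L : List Int), Dom_add_p L → Spec_add_p L (add_p L)

-- ===== LEMMAS AND PROOFS =====

-- a token of ret: nonempty and not the two-char string ")("
def pvGood (t : String) : Prop := t.toList ≠ [] ∧ t.toList ≠ [')', '(']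

-- one paren block of A's ret
def pvBlock (n : Int) : List String :=
  List.replicate n.toNat "(" ++ [PySem.Int.toStr n] ++ List.replicate n.toNat ")"

-- stack machine equivalent to A's backtracking while-loop
def pvNorm (stk : List String) : List String → List String
  | [] => stk
  | x :: rs => if stk.head? = some ")" ∧ x = "(" then pvNorm stk.tail rs else pvNorm (x :: stk) rs

-- B's output as a token list
def pvBtok : Nat → List Int → List String
  | p, [] => List.replicate p ")"
  | p, n :: L =>
    (if p ≤ n.toNat then List.replicate (n.toNat - p) "(" else List.replicate (p - n.toNat) ")")
      ++ [PySem.Int.toStr n] ++ pvBtok n.toNat L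

set_option maxHeartbeats 1000000

-- characters produced by Nat.toDigits are never parens
lemma pv_digitChar_ne (m : Nat) : Nat.digitChar m ≠ '(' ∧ Nat.digitChar m ≠ ')' := by
  rcases Nat.lt_or_ge m 16 with h | h
  · interval_cases m <;> exact ⟨by decide, by decide⟩
  · have h' : Nat.digitChar m = '*' := by
      unfold Nat.digitChar
      repeat rw [if_neg (by omega)]
    rw [h']
    exact ⟨by decide, by decide⟩

lemma pv_toDigitsCore_succ (b f n : Nat) (acc : List Char) :
    Nat.toDigitsCore b (f + 1) n acc =
      if n / b = 0 then (n % b).digitChar :: acc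
      else Nat.toDigitsCore b f (n / b) ((n % b).digitChar :: acc) := rfl

lemma pv_toDigitsCore_mem (b : Nat) : ∀ (f n : Nat) (acc : List Char) (c : Char),
    c ∈ Nat.toDigitsCore b f n acc → c ∈ acc ∨ ∃ m, c = Nat.digitChar m := by
  intro f
  induction f with
  | zero => intro n acc c h; exact Or.inl h
  | succ f ih =>
    intro n acc c h
    rw [pv_toDigitsCore_succ] at h
    by_cases h0 : n / b = 0
    · rw [if_pos h0] at h
      rcases List.mem_cons.mp h with h | h
      · exact Or.inr ⟨n % b, h⟩
      · exact Or.inl h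
    · rw [if_neg h0] at h
      rcases ih _ _ _ h with h | h
      · rcases List.mem_cons.mp h with h | h
        · exact Or.inr ⟨n % b, h⟩
        · exact Or.inl h
      · exact Or.inr h

lemma pv_toDigitsCore_ne_nil (b : Nat) : ∀ (f n : Nat) (acc : List Char), acc ≠ [] →
    Nat.toDigitsCore b f n acc ≠ [] := by
  intro f
  induction f with
  | zero => intro n acc h; exact h
  | succ f ih =>
    intro n acc h
    rw [pv_toDigitsCore_succ]
    by_cases h0 : n / b = 0
    · simp [h0]
    · rw [if_neg h0]
      exact ih _ _ (by simp)

lemma pv_toDigits_ne_nil (b n : Nat) : Nat.toDigits b n ≠ [] := by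
  unfold Nat.toDigits
  rw [pv_toDigitsCore_succ]
  by_cases h0 : n / b = 0
  · simp [h0]
  · rw [if_neg h0]
    exact pv_toDigitsCore_ne_nil b _ _ _ (by simp)

lemma pv_toChars_ne_nil (n : Int) : PySem.Int.toChars n ≠ [] := by
  unfold PySem.Int.toChars
  split_ifs
  · simp
  · exact pv_toDigits_ne_nil _ _

lemma pv_toChars_mem (n : Int) (c : Char) (h : c ∈ PySem.Int.toChars n) : c ≠ '(' ∧ c ≠ ')' := by
  unfold PySem.Int.toChars at h
  have key : ∀ m : Nat, c ∈ Nat.toDigits 10 m → c ≠ '(' ∧ c ≠ ')' := by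
    intro m hm
    rcases pv_toDigitsCore_mem 10 _ _ _ _ hm with h' | ⟨k, rfl⟩
    · simp at h'
    · exact pv_digitChar_ne k
  split_ifs at h
  · rcases List.mem_cons.mp h with h | h
    · subst h; exact ⟨by decide, by decide⟩
    · exact key _ h
  · exact key _ h

lemma pv_toStr_toList (n : Int) : (PySem.Int.toStr n).toList = PySem.Int.toChars n :=
  PySem.Int.toList_toStr n

lemma pv_good_toStr (n : Int) : pvGood (PySem.Int.toStr n) := by
  constructor
  · rw [pv_toStr_toList]; exact pv_toChars_ne_nil n
  · rw [pv_toStr_toList]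
    intro h
    have : ')' ∈ PySem.Int.toChars n := by rw [h]; simp
    exact (pv_toChars_mem n ')' this).2 rfl

lemma pv_toStr_ne_open (n : Int) : PySem.Int.toStr n ≠ "(" := by
  intro h
  have h' := congrArg String.toList h
  rw [pv_toStr_toList] at h'
  have : '(' ∈ PySem.Int.toChars n := by rw [h']; simp
  exact (pv_toChars_mem n '(' this).1 rfl

lemma pv_toStr_ne_close (n : Int) : PySem.Int.toStr n ≠ ")" := by
  intro h
  have h' := congrArg String.toList h
  rw [pv_toStr_toList] at h'
  have : ')' ∈ PySem.Int.toChars n := by rw [h']; simp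
  exact (pv_toChars_mem n ')' this).2 rfl

lemma pv_good_open : pvGood "(" := ⟨by decide, by decide⟩
lemma pv_good_close : pvGood ")" := ⟨by decide, by decide⟩

-- the two-token join equals ")(" iff the tokens are ")" and "("
lemma pv_join2 (s r : String) (hs : s.toList ≠ []) (hr : r.toList ≠ []) :
    s ++ r = ")(" ↔ s = ")" ∧ r = "(" := by
  constructor
  · intro h
    have h' : s.toList ++ r.toList = [')', '('] := by
      have := congrArg String.toList h
      simpa using this
    rcases List.exists_cons_of_ne_nil hs with ⟨a, as, hsa⟩
    rcases List.exists_cons_of_ne_nil hr with ⟨b, bs, hrb⟩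
    rw [hsa, hrb] at h'
    have hlen := congrArg List.length h'
    simp only [List.length_append, List.length_cons] at hlen
    have has : as = [] := by cases as with
      | nil => rfl
      | cons x xs => exfalso; simp at hlen; omega
    have hbs : bs = [] := by cases bs with
      | nil => rfl
      | cons x xs => exfalso; simp at hlen; omega
    subst has; subst hbs
    simp only [List.singleton_append, List.cons.injEq] at h'
    obtain ⟨ha, hb, -⟩ := h'
    constructor
    · apply String.toList_inj.mp; rw [hsa, ha]; rfl
    · apply String.toList_inj.mp; rw [hrb, hb]; rfl
  · rintro ⟨rfl, rfl⟩; rfl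

lemma pv_join_foldl (l : List String) : ∀ (t : String),
    l.foldl (fun r s => r ++ s) t = t ++ String.join l := by
  induction l with
  | nil => intro t; simp [String.join]
  | cons x xs ih =>
    intro t
    simp only [List.foldl_cons]
    rw [ih (t ++ x)]
    have hj : String.join (x :: xs) = x ++ String.join xs := by
      rw [String.join, List.foldl_cons, ih ("" ++ x)]
      simp
    rw [hj, ← String.append_assoc]

lemma pv_join_cons (s : String) (l : List String) :
    String.join (s :: l) = s ++ String.join l := by
  rw [String.join, List.foldl_cons, pv_join_foldl]
  simp

lemma pv_join_nil : String.join ([] : List String) = "" := rfl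

lemma pv_join_append (l1 l2 : List String) :
    String.join (l1 ++ l2) = String.join l1 ++ String.join l2 := by
  induction l1 with
  | nil => simp [String.join]
  | cons x xs ih => simp only [List.cons_append, pv_join_cons, ih, String.append_assoc]

lemma pv_join_rep (k : Nat) (c : Char) :
    String.join (List.replicate k (String.ofList [c])) = String.ofList (List.replicate k c) := by
  induction k with
  | zero => rfl
  | succ k ih =>
    rw [List.replicate_succ, pv_join_cons, ih]
    apply String.toList_inj.mp
    simp [List.replicate_succ]

-- list surgery for the two pops
lemma pv_eraseIdx_mid {α : Type} (P : List α) (s : α) (rs : List α) :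
    (P ++ s :: rs).eraseIdx P.length = P ++ rs := by
  induction P with
  | nil => simp
  | cons x xs ih => simpa [List.eraseIdx] using ih

lemma pv_pop_mid (P : List String) (s : String) (rs : List String) :
    PySem.List.pop? (P ++ s :: rs) (P.length : Int) = some (s, P ++ rs) := by
  have h : P.length < (P ++ s :: rs).length := by simp
  rw [PySem.List.pop?_natCast (P ++ s :: rs) P.length h]
  congr 1
  refine Prod.ext ?_ ?_
  · show (P ++ s :: rs)[P.length] = s
    simp [List.getElem_append_right]
  · exact pv_eraseIdx_mid P s rs

lemma pv_slice_mid (P : List String) (s r : String) (rs : List String) :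
    PySem.List.slice (P ++ s :: r :: rs) (some (P.length : Int)) (some ((P.length : Int) + 2)) = [s, r] := by
  have h2 : ((P.length : Int) + 2) = (P.length : Int) + ((2 : Nat) : Int) := by norm_num
  rw [h2, PySem.List.slice_natCast_add, List.drop_left]
  rfl

-- ===== the bisimulation: A's while-loop = the stack machine =====
lemma pv_bisim : ∀ (rest stk : List String),
    (∀ t ∈ stk, pvGood t) → (∀ t ∈ rest, pvGood t) →
    pvLoopA (stk.reverse ++ rest) ((stk.length : Int) - 1) ((stk.length : Int) + rest.length)
      = (pvNorm stk rest).reverse := by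
  intro rest
  induction rest with
  | nil =>
    intro stk hstk hrest
    rw [pvLoopA]
    rw [dif_neg (by simp)]
    simp [pvNorm]
  | cons r rs ih =>
    intro stk hstk hrest
    have hgr : pvGood r := hrest r (by simp)
    have hrest' : ∀ t ∈ rs, pvGood t := fun t ht => hrest t (by simp [ht])
    cases stk with
    | nil =>
      -- i = -1: the slice ret[-1:1] is [] (len ≥ 2) or the single head token (len = 1), never ")("
      rw [pvLoopA]
      rw [dif_pos (by push_cast [List.length_cons, List.length_nil]; omega)]
      have hcond : ¬ (String.join (PySem.List.slice (([] : List String).reverse ++ r :: rs)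
          (some (((([] : List String).length : Int)) - 1)) (some (((([] : List String).length : Int)) - 1 + 2))) = ")(") := by
        simp only [List.reverse_nil, List.nil_append, List.length_nil, Nat.cast_zero]
        norm_num
        cases rs with
        | nil =>
          have hsl : PySem.List.slice [r] (some (-1)) (some 1) = [r] := by
            simp [PySem.List.slice, PySem.List.clampIdx]
          rw [hsl, pv_join_cons]
          simp only [String.join, List.foldl_nil]
          intro hc
          apply hgr.2
          have := congrArg String.toList hc
          simpa using this
        | cons x xs =>
          have hsl : PySem.List.slice (r :: x :: xs) (some (-1)) (some 1) = [] := by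
            simp only [PySem.List.slice, PySem.List.clampIdx]
            norm_num
            rw [if_neg (show ¬ ((xs.length : Int) + 1 < 0) by omega)]
            omega
          rw [hsl]
          decide
      rw [if_neg hcond]
      have hnorm : pvNorm ([] : List String) (r :: rs) = pvNorm [r] rs := by
        simp [pvNorm]
      rw [hnorm]
      have := ih [r] (by intro t ht; simp at ht; subst ht; exact hgr) hrest'
      simp only [List.reverse_cons, List.reverse_nil, List.nil_append, List.length_cons,
        List.length_nil, Nat.cast_zero] at this ⊢
      convert this using 2
      all_goals push_cast [List.length_cons, List.length_nil]
      all_goals omega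
    | cons s stk' =>
      have hgs : pvGood s := hstk s (by simp)
      have hstk' : ∀ t ∈ stk', pvGood t := fun t ht => hstk t (by simp [ht])
      have hlen : (((s :: stk').length : Int)) - 1 = ((stk'.reverse.length : Nat) : Int) := by
        simp
      rw [pvLoopA]
      rw [dif_pos (by push_cast [List.length_cons]; omega)]
      have hret : (s :: stk').reverse ++ r :: rs = stk'.reverse ++ s :: r :: rs := by
        simp
      have hsl : PySem.List.slice ((s :: stk').reverse ++ r :: rs)
          (some ((((s :: stk').length : Int)) - 1)) (some ((((s :: stk').length : Int)) - 1 + 2)) = [s, r] := by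
        rw [hlen, hret]
        exact pv_slice_mid stk'.reverse s r rs
      rw [hsl]
      have hjoin : String.join [s, r] = s ++ r := by
        rw [pv_join_cons, pv_join_cons]
        simp [String.join]
      rw [hjoin]
      by_cases hc : s ++ r = ")("
      · rw [if_pos hc]
        obtain ⟨hs, hr⟩ := (pv_join2 s r hgs.1 hgr.1).mp hc
        have hp1 : PySem.List.pop? ((s :: stk').reverse ++ r :: rs) ((((s :: stk').length : Int)) - 1)
            = some (s, stk'.reverse ++ r :: rs) := by
          rw [hlen, hret]
          exact pv_pop_mid stk'.reverse s (r :: rs)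
        have hp2 : PySem.List.pop? (stk'.reverse ++ r :: rs) ((((s :: stk').length : Int)) - 1)
            = some (r, stk'.reverse ++ rs) := by
          rw [hlen]
          exact pv_pop_mid stk'.reverse r rs
        simp only [hp1]
        simp only [hp2]
        have hres := ih stk' hstk' hrest'
        have hnorm : pvNorm (s :: stk') (r :: rs) = pvNorm stk' rs := by
          simp [pvNorm, hs, hr]
        rw [hnorm]
        convert hres using 2 <;> push_cast [List.length_cons, List.length_nil] <;> omega
      · rw [if_neg hc]
        have hnorm : pvNorm (s :: stk') (r :: rs) = pvNorm (r :: s :: stk') rs := by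
          have : ¬ ((s :: stk').head? = some ")" ∧ r = "(") := by
            rintro ⟨h1, h2⟩
            apply hc
            have : s = ")" := by simpa using h1
            rw [this, h2]
            rfl
          simp only [pvNorm, if_neg this]
        rw [hnorm]
        have hres := ih (r :: s :: stk')
          (by intro t ht; rcases List.mem_cons.mp ht with rfl | ht; · exact hgr
              · exact hstk t ht) hrest'
        have hret2 : (r :: s :: stk').reverse ++ rs = (s :: stk').reverse ++ r :: rs := by
          simp
        rw [hret2] at hres
        convert hres using 2 <;> push_cast [List.length_cons, List.length_nil] <;> omega

-- ===== stack-machine lemmas toward B's closed form =====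
lemma pv_norm_push (stk : List String) (x : String) (rest : List String)
    (h : ¬ (stk.head? = some ")" ∧ x = "(")) :
    pvNorm stk (x :: rest) = pvNorm (x :: stk) rest := by
  simp only [pvNorm, if_neg h]

lemma pv_norm_close_push (m : Nat) : ∀ (stk rest : List String),
    pvNorm stk (List.replicate m ")" ++ rest) = pvNorm (List.replicate m ")" ++ stk) rest := by
  induction m with
  | zero => intro stk rest; simp
  | succ m ih =>
    intro stk rest
    rw [List.replicate_succ, List.cons_append, pv_norm_push _ _ _ (by simp), ih]
    congr 1
    rw [List.append_cons, ← List.replicate_succ', List.replicate_succ, List.cons_append]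

lemma pv_norm_open_push (m : Nat) : ∀ (j : Nat) (T rest : List String), T.head? ≠ some ")" →
    pvNorm (List.replicate j "(" ++ T) (List.replicate m "(" ++ rest)
      = pvNorm (List.replicate (m + j) "(" ++ T) rest := by
  induction m with
  | zero => intro j T rest hT; simp
  | succ m ih =>
    intro j T rest hT
    rw [List.replicate_succ, List.cons_append]
    rw [pv_norm_push]
    · have step : ("(" : String) :: (List.replicate j "(" ++ T) = List.replicate (j + 1) "(" ++ T := by
        rw [List.replicate_succ]; rfl
      rw [step, ih (j + 1) T rest hT]
      have hmj : m + (j + 1) = m + 1 + j := by omega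
      rw [hmj]
    · rintro ⟨hhd, -⟩
      cases j with
      | zero =>
        simp only [List.replicate_zero, List.nil_append] at hhd
        exact hT hhd
      | succ j =>
        rw [List.replicate_succ] at hhd
        simp at hhd

lemma pv_norm_open_cancel (m : Nat) : ∀ (p : Nat) (T rest : List String), T.head? ≠ some ")" →
    pvNorm (List.replicate p ")" ++ T) (List.replicate m "(" ++ rest)
      = if p ≤ m then pvNorm (List.replicate (m - p) "(" ++ T) rest
        else pvNorm (List.replicate (p - m) ")" ++ T) rest := by
  induction m with
  | zero =>
    intro p T rest hT
    cases p with
    | zero => simp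
    | succ p => rw [if_neg (by omega)]; simp
  | succ m ih =>
    intro p T rest hT
    cases p with
    | zero =>
      rw [if_pos (by omega)]
      have h0 : pvNorm (List.replicate 0 ")" ++ T) (List.replicate (m + 1) "(" ++ rest)
          = pvNorm (List.replicate 0 "(" ++ T) (List.replicate (m + 1) "(" ++ rest) := by simp
      rw [h0, pv_norm_open_push (m + 1) 0 T rest hT]
      norm_num
    | succ p =>
      rw [List.replicate_succ, List.cons_append, List.replicate_succ, List.cons_append]
      have hstep : pvNorm ((")" : String) :: (List.replicate p ")" ++ T)) (("(" : String) :: (List.replicate m "(" ++ rest))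
          = pvNorm (List.replicate p ")" ++ T) (List.replicate m "(" ++ rest) := by
        simp [pvNorm]
      rw [hstep, ih p T rest hT]
      by_cases hpm : p ≤ m
      · rw [if_pos hpm, if_pos (by omega)]
        have hq : m - p = m + 1 - (p + 1) := by omega
        rw [hq]
      · rw [if_neg hpm, if_neg (by omega)]
        have hq : p - m = p + 1 - (m + 1) := by omega
        rw [hq]

-- ===== the main cancellation lemma =====
lemma pv_norm_blocks : ∀ (L : List Int) (p : Nat) (T : List String), T.head? ≠ some ")" →
    pvNorm (List.replicate p ")" ++ T) (L.flatMap pvBlock)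
      = (pvBtok p L).reverse ++ T := by
  intro L
  induction L with
  | nil =>
    intro p T hT
    simp [pvNorm, pvBtok, List.reverse_replicate]
  | cons n L ih =>
    intro p T hT
    rw [List.flatMap_cons]
    have hassoc : pvBlock n ++ L.flatMap pvBlock
        = List.replicate n.toNat "(" ++ ([PySem.Int.toStr n]
          ++ (List.replicate n.toNat ")" ++ L.flatMap pvBlock)) := by
      unfold pvBlock
      simp [List.append_assoc]
    rw [hassoc, pv_norm_open_cancel n.toNat p T _ hT]
    have hbt : pvBtok p (n :: L)
        = (if p ≤ n.toNat then List.replicate (n.toNat - p) "(" else List.replicate (p - n.toNat) ")")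
          ++ [PySem.Int.toStr n] ++ pvBtok n.toNat L := rfl
    by_cases hpn : p ≤ n.toNat
    · rw [if_pos hpn]
      rw [List.singleton_append]
      rw [pv_norm_push _ _ _ (by rintro ⟨-, h⟩; exact pv_toStr_ne_open n h)]
      rw [pv_norm_close_push]
      have hT' : (PySem.Int.toStr n :: (List.replicate (n.toNat - p) "(" ++ T)).head? ≠ some ")" := by
        intro h
        exact pv_toStr_ne_close n (by simpa using h)
      rw [ih n.toNat (PySem.Int.toStr n :: (List.replicate (n.toNat - p) "(" ++ T)) hT']
      rw [hbt, if_pos hpn]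
      simp [List.reverse_append, List.reverse_replicate, List.append_assoc]
    · rw [if_neg hpn]
      rw [List.singleton_append]
      rw [pv_norm_push _ _ _ (by rintro ⟨-, h⟩; exact pv_toStr_ne_open n h)]
      rw [pv_norm_close_push]
      have hT' : (PySem.Int.toStr n :: (List.replicate (p - n.toNat) ")" ++ T)).head? ≠ some ")" := by
        intro h
        exact pv_toStr_ne_close n (by simpa using h)
      rw [ih n.toNat (PySem.Int.toStr n :: (List.replicate (p - n.toNat) ")" ++ T)) hT']
      rw [hbt, if_neg hpn]
      simp [List.reverse_append, List.reverse_replicate, List.append_assoc]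

lemma pv_build_eq (L : List Int) : pvBuild L = L.flatMap pvBlock := by
  unfold pvBuild pvBlock
  rw [PySem.List.foldl_append_eq_flatMap]
  simp

lemma pv_blocks_good (L : List Int) : ∀ t ∈ L.flatMap pvBlock, pvGood t := by
  intro t ht
  simp only [List.mem_flatMap] at ht
  rcases ht with ⟨n, _, ht⟩
  unfold pvBlock at ht
  simp only [List.mem_append, List.mem_replicate, List.mem_singleton] at ht
  rcases ht with (⟨_, rfl⟩ | rfl) | ⟨_, rfl⟩
  · exact pv_good_open
  · exact pv_good_toStr n
  · exact pv_good_close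

-- ===== B's fold = join of pvBtok =====
lemma pv_alt_fold : ∀ (L : List Int) (p : Nat) (parts : List String),
    (let st := L.foldl pvStepB ((p : Int), parts)
     String.join (st.2 ++ [String.ofList (List.replicate st.1.toNat ')')]))
      = String.join parts ++ String.join (pvBtok p L) := by
  intro L
  induction L with
  | nil =>
    intro p parts
    simp only [List.foldl_nil, pvBtok]
    rw [pv_join_append, pv_join_cons]
    have h1 : (")" : String) = String.ofList [')'] := rfl
    rw [h1, pv_join_rep]
    simp [String.join]
  | cons n L ih =>
    intro p parts
    rw [List.foldl_cons]
    have hm : (if (0 : Int) < n then n else 0) = (n.toNat : Int) := by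
      split_ifs <;> omega
    by_cases hpn : p ≤ n.toNat
    · have hstep : pvStepB ((p : Int), parts) n
          = ((n.toNat : Int), parts ++ [String.ofList (List.replicate (n.toNat - p) '(')]
              ++ [PySem.Int.toStr n]) := by
        simp only [pvStepB, hm]
        rw [if_pos (by exact_mod_cast hpn)]
        congr 3
        have : ((n.toNat : Int) - (p : Int)).toNat = n.toNat - p := by omega
        rw [this]
      rw [hstep, ih n.toNat _]
      have hbt : pvBtok p (n :: L)
          = List.replicate (n.toNat - p) "(" ++ [PySem.Int.toStr n] ++ pvBtok n.toNat L := by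
        show (if p ≤ n.toNat then _ else _) ++ _ ++ _ = _
        rw [if_pos hpn]
      rw [hbt]
      have h1 : ("(" : String) = String.ofList ['('] := rfl
      simp only [pv_join_append, pv_join_cons, h1, pv_join_rep, pv_join_nil]
      simp [String.append_assoc]
    · have hstep : pvStepB ((p : Int), parts) n
          = ((n.toNat : Int), parts ++ [String.ofList (List.replicate (p - n.toNat) ')')]
              ++ [PySem.Int.toStr n]) := by
        simp only [pvStepB, hm]
        rw [if_neg (by exact_mod_cast hpn)]
        congr 3
        have : ((p : Int) - (n.toNat : Int)).toNat = p - n.toNat := by omega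
        rw [this]
      rw [hstep, ih n.toNat _]
      have hbt : pvBtok p (n :: L)
          = List.replicate (p - n.toNat) ")" ++ [PySem.Int.toStr n] ++ pvBtok n.toNat L := by
        show (if p ≤ n.toNat then _ else _) ++ _ ++ _ = _
        rw [if_neg hpn]
      rw [hbt]
      have h1 : (")" : String) = String.ofList [')'] := rfl
      simp only [pv_join_append, pv_join_cons, h1, pv_join_rep, pv_join_nil]
      simp [String.append_assoc]

-- ===== VERDICT (by name: the statement is the Claim_ definition above) =====
theorem add_p_spec : Claim_equal_add_p := by
  intro L _
  unfold Spec_add_p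
  show add_p L = add_p_alt L
  have halt : add_p_alt L = String.join (pvBtok 0 L) := by
    have hf := pv_alt_fold L 0 []
    simp only [Nat.cast_zero] at hf
    unfold add_p_alt
    rw [hf]
    simp [String.join]
  rw [halt]
  unfold add_p
  rw [pv_build_eq]
  show String.join (pvLoopA (L.flatMap pvBlock) 0 (PySem.List.len (L.flatMap pvBlock)))
      = String.join (pvBtok 0 L)
  have hlen : PySem.List.len (L.flatMap pvBlock) = ((L.flatMap pvBlock).length : Int) := rfl
  rw [hlen]
  cases hfm : L.flatMap pvBlock with
  | nil =>
    rw [pvLoopA]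
    rw [dif_neg (by simp)]
    have hL : L = [] := by
      cases L with
      | nil => rfl
      | cons n L' =>
        exfalso
        have h0 : pvBlock n ++ L'.flatMap pvBlock = [] := by
          rw [← List.flatMap_cons]; exact hfm
        have := congrArg List.length h0
        simp [pvBlock] at this
    subst hL
    rfl
  | cons t ts =>
    have hgood := pv_blocks_good L
    rw [hfm] at hgood
    have hbis := pv_bisim ts [t]
      (by intro u hu
          simp only [List.mem_singleton] at hu
          exact hgood u (by simp [hu]))
      (fun u hu => hgood u (by simp [hu]))
    have hargs1 : (([t] : List String).length : Int) - 1 = 0 := by simp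
    have hargs2 : (([t] : List String).length : Int) + (ts.length : Int) = (((t :: ts) : List String).length : Int) := by
      push_cast [List.length_cons, List.length_nil]
      omega
    rw [hargs1, hargs2] at hbis
    simp only [List.reverse_singleton, List.singleton_append] at hbis
    rw [hbis]
    have hnorm0 : pvNorm ([] : List String) (t :: ts) = pvNorm [t] ts := by
      simp [pvNorm]
    have hblocks := pv_norm_blocks L 0 [] (by simp)
    simp only [List.replicate_zero, List.append_nil] at hblocks
    rw [hfm] at hblocks
    rw [hnorm0] at hblocks
    rw [hblocks, List.reverse_reverse]
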